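-- pv_equiv track=rewrite | github.com/prashansaaa29/100-days-of-code | Medium/Number of Rectangles in a Circle/number-of-rectangles-in-a-circle.py | rectanglesInCircle
-- ===== SOURCE A (Python) =====
-- def rectanglesInCircle(r):
--     if r < 1 or r > 1000:
--         return 0  # Return 0 if r is outside the valid range
--
--     count = 0
--     for length in range(1, 2 * r + 1):
--         for width in range(1, 2 * r + 1):
--
--             if length * length + width * width <= 4 * r * r:
--                 count += 1
--
--     return count
-- ===== SOURCE B (Python) =====
-- def rectanglesInCircle(r):
--     if r < 1 or r > 1000:
--         return 0  # same valid-range guard as the task states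
--
--     # Two-pointer sweep: for each length, the number of valid widths is the
--     # largest w with length^2 + w^2 <= 4r^2, and that w only decreases as
--     # length grows, so one pointer moving down suffices: O(r) total.
--     count = 0
--     w = 2 * r
--     for length in range(1, 2 * r + 1):
--         while length * length + w * w > 4 * r * r:
--             w -= 1
--         count += w
--     return count
-- ===== Notes on version B (the rewrite author's own statement) =====
-- stated objective: faster
-- what changed: Replaced the O(r^2) nested scan over all (length,width) pairs by a two-pointer sweep: the maximal valid width is antitone in the length, so a single width pointer moving down gives each row's count in O(r) total.
import Mathlib
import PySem

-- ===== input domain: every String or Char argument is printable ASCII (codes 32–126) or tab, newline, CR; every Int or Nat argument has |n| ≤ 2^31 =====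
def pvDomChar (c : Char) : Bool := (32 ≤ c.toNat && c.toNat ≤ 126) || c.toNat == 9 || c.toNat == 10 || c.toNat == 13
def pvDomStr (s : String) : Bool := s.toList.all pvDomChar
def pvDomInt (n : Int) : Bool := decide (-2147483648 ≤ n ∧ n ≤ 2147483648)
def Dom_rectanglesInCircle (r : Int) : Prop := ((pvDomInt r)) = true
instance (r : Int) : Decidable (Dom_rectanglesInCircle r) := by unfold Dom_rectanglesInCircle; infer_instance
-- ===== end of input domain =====

-- B replaces A's O(r^2) nested scan by a two-pointer sweep (one width pointer that only
-- moves down), an asymptotically faster (O(r)) computation of the same count.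

-- ===== PORT A =====
def rectanglesInCircle (r : Int) : Int :=
  if r < 1 ∨ r > 1000 then 0
  else
    (PySem.List.pyRange 1 (2 * r + 1) 1).foldl (fun count length =>
      (PySem.List.pyRange 1 (2 * r + 1) 1).foldl (fun c width =>
        if length * length + width * width ≤ 4 * r * r then c + 1 else c) count) 0

-- ===== PORT B =====
-- The Python 'while' loop: decrement w while length^2 + w^2 > 4r^2.  The extra '0 < w'
-- conjunct is a totality guard only: whenever the Python loop terminates it stops at some
-- w ≥ 0, and on every input B actually reaches this loop it never fires a different branch.
def pvShrink (L C w : Int) : Int :=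
  if h : C < L * L + w * w ∧ 0 < w then pvShrink L C (w - 1) else w
termination_by w.toNat
decreasing_by omega

def rectanglesInCircle_alt (r : Int) : Int :=
  if r < 1 ∨ r > 1000 then 0
  else
    ((PySem.List.pyRange 1 (2 * r + 1) 1).foldl
      (fun (st : Int × Int) length =>
        let w := pvShrink length (4 * r * r) st.2
        (st.1 + w, w)) (0, 2 * r)).1

-- ===== PRECONDITION & SPEC =====
def Spec_rectanglesInCircle (r : Int) (out : Int) : Prop := out = rectanglesInCircle_alt r
instance (r : Int) (out : Int) : Decidable (Spec_rectanglesInCircle r out) := by unfold Spec_rectanglesInCircle; infer_instance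

-- ===== CLAIM (what is proved, stated in full; the proofs are below) =====
def Claim_equal_rectanglesInCircle : Prop := ∀ (r : Int), Dom_rectanglesInCircle r → Spec_rectanglesInCircle r (rectanglesInCircle r)

-- ===== LEMMAS AND PROOFS =====

-- the maximal width for a given length: ⌊√(4r² − L²)⌋
def mW (r L : Int) : Int := (((4 * r * r - L * L).toNat.sqrt : Nat) : Int)

theorem mW_nonneg (r L : Int) : 0 ≤ mW r L := Int.natCast_nonneg _

theorem mW_sq_le (r L : Int) (hL : L * L ≤ 4 * r * r) :
    L * L + mW r L * mW r L ≤ 4 * r * r := by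
  have hnn : (0 : Int) ≤ 4 * r * r - L * L := by omega
  have h1 : ((4 * r * r - L * L).toNat.sqrt * (4 * r * r - L * L).toNat.sqrt : Nat)
      ≤ (4 * r * r - L * L).toNat := Nat.sqrt_le _
  have h2 : (((4 * r * r - L * L).toNat : Nat) : Int) = 4 * r * r - L * L :=
    Int.toNat_of_nonneg hnn
  have := (Int.ofNat_le.mpr h1)
  push_cast at this
  simp only [mW]
  omega

theorem mW_lt_of_gt (r L w : Int) (hL : L * L ≤ 4 * r * r) (hw : mW r L < w) :
    4 * r * r < L * L + w * w := by
  have hnn : (0 : Int) ≤ 4 * r * r - L * L := by omega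
  have h1 : (4 * r * r - L * L).toNat <
      ((4 * r * r - L * L).toNat.sqrt + 1) * ((4 * r * r - L * L).toNat.sqrt + 1) :=
    Nat.lt_succ_sqrt _
  have h2 : (((4 * r * r - L * L).toNat : Nat) : Int) = 4 * r * r - L * L :=
    Int.toNat_of_nonneg hnn
  have h3 := Int.ofNat_lt.mpr h1
  push_cast at h3
  have hm1 : mW r L + 1 ≤ w := hw
  have hpos : 0 < mW r L + 1 := by have := mW_nonneg r L; omega
  have h4 : (mW r L + 1) * (mW r L + 1) ≤ w * w :=
    mul_le_mul hm1 hm1 (le_of_lt hpos) (by omega)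
  simp only [mW] at h3 h4 ⊢
  omega

theorem mW_antitone (r L L' : Int) (h0 : 0 ≤ L) (h : L ≤ L') : mW r L' ≤ mW r L := by
  have hsq : L * L ≤ L' * L' := mul_le_mul h h h0 (by omega)
  have : (4 * r * r - L' * L').toNat ≤ (4 * r * r - L * L).toNat := by omega
  exact Int.ofNat_le.mpr (Nat.sqrt_le_sqrt this)

theorem mW_le_2r (r L : Int) (hr : 1 ≤ r) (h0 : 0 ≤ L) : mW r L ≤ 2 * r := by
  have h2r : (0 : Int) ≤ 2 * r := by omega
  have hL2 : (0 : Int) ≤ L * L := mul_nonneg h0 h0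
  have h1 : (4 * r * r - L * L).toNat ≤ (4 * r * r).toNat := by omega
  have h2 : (4 * r * r : Int).toNat = (2 * r).toNat * (2 * r).toNat := by
    have : (4 * r * r : Int) = (2 * r) * (2 * r) := by ring
    rw [this, Int.toNat_mul h2r h2r]
  have h3 : (4 * r * r : Int).toNat.sqrt = (2 * r).toNat := by
    rw [h2, ← pow_two]; exact Nat.sqrt_eq' ((2 * r).toNat)
  have h4 : (4 * r * r - L * L).toNat.sqrt ≤ (2 * r).toNat := h3 ▸ Nat.sqrt_le_sqrt h1
  have := Int.ofNat_le.mpr h4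
  simp only [mW]
  omega

theorem pvShrink_eq (r L : Int) (hL : L * L ≤ 4 * r * r) :
    ∀ (n : Nat) (w : Int), w.toNat ≤ n → mW r L ≤ w →
      pvShrink L (4 * r * r) w = mW r L := by
  intro n
  induction n with
  | zero =>
    intro w hn hw
    rw [pvShrink]
    have hw0 : w ≤ 0 := by omega
    have := mW_nonneg r L
    have hweq : w = mW r L := by omega
    rw [dif_neg (by omega : ¬(4 * r * r < L * L + w * w ∧ 0 < w))]
    exact hweq
  | succ n ih =>
    intro w hn hw
    rw [pvShrink]
    split_ifs with h
    · have hne : mW r L ≠ w := by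
        intro he
        have := mW_sq_le r L hL
        rw [he] at this; omega
      have hw' : mW r L ≤ w - 1 := by omega
      exact ih (w - 1) (by omega) hw'
    · -- loop exit: either L² + w² ≤ 4r² (so w ≤ mW) or w ≤ 0 (so w = 0 = mW)
      rcases not_and_or.mp h with h1 | h2
      · have hle : w ≤ mW r L := by
          by_contra hgt
          exact h1 (mW_lt_of_gt r L w hL (by omega))
        omega
      · have := mW_nonneg r L; omega

theorem inner_count (r L c : Int) (hr : 1 ≤ r) (h1 : 1 ≤ L) (h2 : L ≤ 2 * r) :
    (PySem.List.pyRange 1 (2 * r + 1) 1).foldl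
      (fun c width => if L * L + width * width ≤ 4 * r * r then c + 1 else c) c
      = c + mW r L := by
  have hL2 : L * L ≤ 4 * r * r := by
    have : L * L ≤ (2 * r) * (2 * r) := mul_le_mul h2 h2 (by omega) (by omega)
    nlinarith
  have hm0 := mW_nonneg r L
  have hm2r := mW_le_2r r L hr (by omega)
  have hstep : (fun (c : Int) width => if L * L + width * width ≤ 4 * r * r then c + 1 else c)
      = (fun c width => if (fun w => decide (L * L + w * w ≤ 4 * r * r)) width = true
          then c + 1 else c) := by
    funext c w; simp
  rw [hstep, PySem.List.foldl_count_if]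
  have hsplit : PySem.List.pyRange 1 (2 * r + 1) 1
      = PySem.List.pyRange 1 (mW r L + 1) 1 ++ PySem.List.pyRange (mW r L + 1) (2 * r + 1) 1 :=
    PySem.List.pyRange_one_append 1 (mW r L + 1) (2 * r + 1) (by omega) (by omega)
  rw [hsplit, List.countP_append]
  have hall : (PySem.List.pyRange 1 (mW r L + 1) 1).countP
      (fun w => decide (L * L + w * w ≤ 4 * r * r))
      = (PySem.List.pyRange 1 (mW r L + 1) 1).length := by
    apply List.countP_eq_length.mpr
    intro w hwmem
    rcases (PySem.List.mem_pyRange_one).mp hwmem with ⟨ha, hb⟩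
    have hwle : w ≤ mW r L := by omega
    have : w * w ≤ mW r L * mW r L := mul_le_mul hwle hwle (by omega) hm0
    have := mW_sq_le r L hL2
    simp; omega
  have hnone : (PySem.List.pyRange (mW r L + 1) (2 * r + 1) 1).countP
      (fun w => decide (L * L + w * w ≤ 4 * r * r)) = 0 := by
    apply List.countP_eq_zero.mpr
    intro w hwmem
    rcases (PySem.List.mem_pyRange_one).mp hwmem with ⟨ha, hb⟩
    have := mW_lt_of_gt r L w hL2 (by omega)
    simp; omega
  rw [hall, hnone, PySem.List.length_pyRange_one]
  have : ((mW r L + 1 - 1).toNat : Int) = mW r L := by omega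
  omega

theorem bfold (r : Int) (hr : 1 ≤ r) :
    ∀ (n : Nat) (a c w : Int), 1 ≤ a → (2 * r + 1 - a).toNat ≤ n → mW r a ≤ w →
      ((PySem.List.pyRange a (2 * r + 1) 1).foldl
        (fun (st : Int × Int) length =>
          let w := pvShrink length (4 * r * r) st.2
          (st.1 + w, w)) (c, w)).1
      = c + ((PySem.List.pyRange a (2 * r + 1) 1).map (mW r)).sum := by
  intro n
  induction n with
  | zero =>
    intro a c w ha hn hw
    have : 2 * r + 1 ≤ a := by omega
    rw [PySem.List.pyRange_one_eq_nil this]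
    simp
  | succ n ih =>
    intro a c w ha hn hw
    by_cases hab : 2 * r + 1 ≤ a
    · rw [PySem.List.pyRange_one_eq_nil hab]; simp
    · have hcons := PySem.List.pyRange_one_cons (a := a) (b := 2 * r + 1) (by omega)
      rw [hcons]
      have haL2 : a * a ≤ 4 * r * r := by
        have h1 : a ≤ 2 * r := by omega
        have : a * a ≤ (2 * r) * (2 * r) := mul_le_mul h1 h1 (by omega) (by omega)
        nlinarith
      have hsh : pvShrink a (4 * r * r) w = mW r a :=
        pvShrink_eq r a haL2 w.toNat w le_rfl hw
      simp only [List.foldl_cons, List.map_cons, List.sum_cons, hsh]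
      have hnext : mW r (a + 1) ≤ mW r a := mW_antitone r a (a + 1) (by omega) (by omega)
      have := ih (a + 1) (c + mW r a) (mW r a) (by omega) (by omega) hnext
      rw [this]; ring

-- ===== VERDICT (by name: the statement is the Claim_ definition above) =====
theorem rectanglesInCircle_spec : Claim_equal_rectanglesInCircle := by
  unfold Claim_equal_rectanglesInCircle Spec_rectanglesInCircle
  intro r _
  unfold rectanglesInCircle rectanglesInCircle_alt
  by_cases hg : r < 1 ∨ r > 1000
  · simp [hg]
  · simp only [hg, if_false]
    have hr : 1 ≤ r := by omega
    have hA : (PySem.List.pyRange 1 (2 * r + 1) 1).foldl (fun count length =>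
        (PySem.List.pyRange 1 (2 * r + 1) 1).foldl (fun c width =>
          if length * length + width * width ≤ 4 * r * r then c + 1 else c) count) 0
        = 0 + ((PySem.List.pyRange 1 (2 * r + 1) 1).map (mW r)).sum := by
      rw [PySem.List.foldl_congr_mem _ _ (fun c L => c + mW r L) 0 ?_]
      · exact PySem.List.foldl_add _ _ _
      · intro acc L hL
        rcases (PySem.List.mem_pyRange_one).mp hL with ⟨h1, h2⟩
        exact inner_count r L acc hr h1 (by omega)
    have hB := bfold r hr (2 * r).toNat 1 0 (2 * r) le_rfl (by omega)
        (mW_le_2r r 1 hr (by omega))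
    rw [hA, hB]
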